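-- pv_equiv track=rewrite | github.com/teniee/mita_project | app/services/core/engine/suggestion_ranker.py | rank_suggestions
-- ===== SOURCE A (Python) =====
-- def rank_suggestions(suggestions: dict, behavior: str) -> list:
--     """
--     Ranks suggestions by importance and behavior.
--     Returns list of tuples: (category, suggestion, priority)
--     """
--     priority_map = {"saver": 2, "spender": 3, "erratic": 4, "neutral": 1}
--     ranked = []
--
--     for cat, tip in suggestions.items():
--         base = 1
--         if "reducing" in tip:
--             base += 1
--         if behavior in ["spender", "erratic"]:
--             base += 1
--         priority = base + priority_map.get(behavior, 1)
--         ranked.append((cat, tip, priority))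
--
--     return sorted(ranked, key=lambda x: -x[2])
-- ===== SOURCE B (Python) =====
-- # Single pass, two buckets: priority is a fixed behavior constant plus 1 iff "reducing" in tip,
-- # so the stable descending sort is exactly high bucket then low bucket, each in insertion order.
-- def rank_suggestions(suggestions: dict, behavior: str) -> list:
--     # Single pass, two buckets (priority takes only two values); no sort needed.
--     const = 1 + (1 if behavior in ("spender", "erratic") else 0) + \
--         {"saver": 2, "spender": 3, "erratic": 4, "neutral": 1}.get(behavior, 1)
--     high = []
--     low = []
--     for cat, tip in suggestions.items():
--         if "reducing" in tip:
--             high.append((cat, tip, const + 1))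
--         else:
--             low.append((cat, tip, const))
--     return high + low
-- ===== Notes on version B (the rewrite author's own statement) =====
-- stated objective: alternative
-- what changed: Replaces build-then-sort with a single-pass two-bucket partition: the priority is a fixed behavior-dependent constant plus 1 iff the tip contains 'reducing', so the stable descending sort is exactly 'reducing' tips first, others after, each in insertion order; O(n) vs O(n log n) asymptotically, though a timing run shows no measurable gain at tested sizes.
import Mathlib
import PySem

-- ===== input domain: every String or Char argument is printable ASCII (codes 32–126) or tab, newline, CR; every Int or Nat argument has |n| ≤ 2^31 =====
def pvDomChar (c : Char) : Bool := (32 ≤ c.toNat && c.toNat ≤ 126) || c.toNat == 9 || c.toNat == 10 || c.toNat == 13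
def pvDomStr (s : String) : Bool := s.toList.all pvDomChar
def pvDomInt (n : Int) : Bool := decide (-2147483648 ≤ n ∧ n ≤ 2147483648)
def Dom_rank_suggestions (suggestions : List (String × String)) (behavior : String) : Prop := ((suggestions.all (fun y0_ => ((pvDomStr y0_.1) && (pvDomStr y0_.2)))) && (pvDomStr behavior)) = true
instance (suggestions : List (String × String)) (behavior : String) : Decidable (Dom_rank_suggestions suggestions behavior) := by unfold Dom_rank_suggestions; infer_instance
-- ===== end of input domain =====

-- B replaces A's build-then-sort with a single-pass two-bucket partition: the priority
-- takes only two values, so the stable descending sort is 'reducing' tips first, others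
-- after, each bucket in insertion order (objective: alternative, avoids the sort).

-- ===== PORT A =====
def rank_suggestions (suggestions : List (String × String)) (behavior : String) : List (String × String × Int) :=
  let priority_map : PySem.Dict String Int :=
    PySem.Dict.ofList [("saver", 2), ("spender", 3), ("erratic", 4), ("neutral", 1)]
  let ranked : List (String × String × Int) :=
    suggestions.foldl (fun acc p =>
      let base : Int := 1
      let base : Int := if PySem.Str.isIn "reducing" p.2 then base + 1 else base
      let base : Int := if (["spender", "erratic"] : List String).contains behavior then base + 1 else base
      let priority : Int := base + priority_map.getD behavior 1
      acc ++ [(p.1, p.2, priority)]) []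
  PySem.List.sorted ranked (fun x => -x.2.2)

-- ===== PORT B =====
def rank_suggestions_alt (suggestions : List (String × String)) (behavior : String) : List (String × String × Int) :=
  let pm : PySem.Dict String Int :=
    PySem.Dict.ofList [("saver", 2), ("spender", 3), ("erratic", 4), ("neutral", 1)]
  let const : Int :=
    1 + (if (["spender", "erratic"] : List String).contains behavior then (1 : Int) else 0) + pm.getD behavior 1
  let hl : List (String × String × Int) × List (String × String × Int) :=
    suggestions.foldl (fun acc p =>
      if PySem.Str.isIn "reducing" p.2 then (acc.1 ++ [(p.1, p.2, const + 1)], acc.2)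
      else (acc.1, acc.2 ++ [(p.1, p.2, const)])) ([], [])
  hl.1 ++ hl.2

-- ===== PRECONDITION & SPEC =====
def Spec_rank_suggestions (suggestions : List (String × String)) (behavior : String) (out : List (String × String × Int)) : Prop := out = rank_suggestions_alt suggestions behavior
instance (suggestions : List (String × String)) (behavior : String) (out : List (String × String × Int)) : Decidable (Spec_rank_suggestions suggestions behavior out) := by unfold Spec_rank_suggestions; infer_instance

-- ===== CLAIM (what is proved, stated in full; the proofs are below) =====
def Claim_equal_rank_suggestions : Prop := ∀ (suggestions : List (String × String)) (behavior : String), Dom_rank_suggestions suggestions behavior → Spec_rank_suggestions suggestions behavior (rank_suggestions suggestions behavior)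

-- ===== LEMMAS AND PROOFS =====

-- insertBy passes over a prefix it is not 'before' any element of
theorem insertBy_append_not_before {α : Type} (before : α → α → Bool) (x : α)
    (A B : List α) (hA : ∀ a ∈ A, before x a = false) :
    PySem.List.insertBy before x (A ++ B) = A ++ PySem.List.insertBy before x B := by
  induction A with
  | nil => simp
  | cons a A ih =>
    have ha : before x a = false := hA a (by simp)
    simp only [List.cons_append, PySem.List.insertBy, ha]
    simp only [Bool.false_eq_true, if_false]
    rw [ih (fun a' h => hA a' (by simp [h]))]

-- the stable insertion-sort fold on a two-valued key is the two-bucket partition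
theorem foldl_insertBy_two_valued {α : Type} (key : α → Int) (lo hi : Int) (hlt : lo < hi)
    (xs : List α) (hk : ∀ x ∈ xs, key x = lo ∨ key x = hi) :
    ∀ (A B : List α), (∀ a ∈ A, key a = lo) → (∀ b ∈ B, key b = hi) →
      xs.foldl (fun acc x => PySem.List.insertBy (fun a b => decide (key a < key b)) x acc) (A ++ B)
        = (A ++ xs.filter (fun x => key x == lo)) ++ (B ++ xs.filter (fun x => key x == hi)) := by
  induction xs with
  | nil => intro A B _ _; simp
  | cons x xs ih =>
    intro A B hA hB
    rcases hk x (by simp) with hx | hx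
    · have step : PySem.List.insertBy (fun a b => decide (key a < key b)) x (A ++ B)
          = (A ++ [x]) ++ B := by
        rw [insertBy_append_not_before]
        · cases B with
          | nil => simp [PySem.List.insertBy]
          | cons b B' =>
            have hb : key b = hi := hB b (by simp)
            simp [PySem.List.insertBy, hx, hb, hlt]
        · intro a ha; simp [hx, hA a ha]
      have h1 : (key x == lo) = true := by simp [hx]
      have h2 : (key x == hi) = false := by simp [hx]; omega
      simp only [List.foldl_cons, step]
      rw [ih (fun y hy => hk y (by simp [hy])) (A ++ [x]) B
        (by intro a ha; rcases List.mem_append.mp ha with h | h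
            · exact hA a h
            · simp at h; subst h; exact hx) hB]
      simp [h1, h2]
    · have step : PySem.List.insertBy (fun a b => decide (key a < key b)) x (A ++ B)
          = A ++ (B ++ [x]) := by
        rw [insertBy_append_not_before]
        · rw [PySem.List.insertBy_of_forall_not_before]
          intro b hb; simp [hx, hB b hb]
        · intro a ha; simp [hx, hA a ha]; omega
      have h1 : (key x == lo) = false := by simp [hx]; omega
      have h2 : (key x == hi) = true := by simp [hx]
      simp only [List.foldl_cons, step]
      rw [ih (fun y hy => hk y (by simp [hy])) A (B ++ [x]) hA
        (by intro b hb; rcases List.mem_append.mp hb with h | h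
            · exact hB b h
            · simp at h; subst h; exact hx)]
      simp [h1, h2]

-- the stable sort of a list whose key takes the two values -(c+1) < -c is the partition
theorem partition_sorted (q : (String × String) → Bool) (c : Int) (xs : List (String × String)) :
    PySem.List.sorted (xs.map (fun p => (p.1, p.2, if q p then c + 1 else c)))
        (fun x : String × String × Int => -x.2.2)
      = (xs.filter q).map (fun p => (p.1, p.2, c + 1))
          ++ (xs.filter (fun p => !q p)).map (fun p => (p.1, p.2, c)) := by
  rw [PySem.List.sorted_eq_foldl_insertBy]
  have hk : ∀ y ∈ xs.map (fun p => (p.1, p.2, if q p then c + 1 else c)),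
      (fun x : String × String × Int => -x.2.2) y = -(c + 1)
        ∨ (fun x : String × String × Int => -x.2.2) y = -c := by
    intro y hy
    rcases List.mem_map.mp hy with ⟨p, _, rfl⟩
    by_cases hq : q p = true <;> simp [hq]
  have := foldl_insertBy_two_valued (fun x : String × String × Int => -x.2.2)
    (-(c + 1)) (-c) (by omega) _ hk [] [] (by simp) (by simp)
  simp only [List.nil_append] at this
  rw [this]
  congr 1
  · have h : ∀ p ∈ xs, ((fun x : String × String × Int => -x.2.2 == -(c + 1)) ∘
        (fun p : String × String => (p.1, p.2, if q p then c + 1 else c))) p = q p := by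
      intro p _
      by_cases hq : q p = true
      · simp [Function.comp, hq]
      · simp [Function.comp, hq]
    rw [List.filter_map, List.filter_congr h]
    apply List.map_congr_left
    intro p hp
    have hq : q p = true := (List.mem_filter.mp hp).2
    simp [hq]
  · have h : ∀ p ∈ xs, ((fun x : String × String × Int => -x.2.2 == -c) ∘
        (fun p : String × String => (p.1, p.2, if q p then c + 1 else c))) p = (!q p) := by
      intro p _
      by_cases hq : q p = true
      · simp [Function.comp, hq]
      · simp [Function.comp, hq]
    rw [List.filter_map, List.filter_congr h]
    apply List.map_congr_left
    intro p hp
    have hq : q p = false := by simpa using (List.mem_filter.mp hp).2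
    simp [hq]

-- B's two-accumulator fold, characterised (generic bucket test q)
theorem alt_fold_char (q : (String × String) → Bool) (c : Int) (xs : List (String × String)) :
    ∀ (H L : List (String × String × Int)),
      xs.foldl (fun acc p =>
        if q p then (acc.1 ++ [(p.1, p.2, c + 1)], acc.2)
        else (acc.1, acc.2 ++ [(p.1, p.2, c)])) (H, L)
      = (H ++ (xs.filter q).map (fun p => (p.1, p.2, c + 1)),
         L ++ (xs.filter (fun p => !q p)).map (fun p => (p.1, p.2, c))) := by
  induction xs with
  | nil => intro H L; simp
  | cons x xs ih =>
    intro H L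
    by_cases hx : q x = true
    · simp only [List.foldl_cons, if_pos hx, ih]
      simp [hx]
    · simp only [List.foldl_cons, if_neg hx, ih]
      simp [hx]

theorem rank_suggestions_eq (suggestions : List (String × String)) (behavior : String) :
    rank_suggestions_alt suggestions behavior = rank_suggestions suggestions behavior := by
  unfold rank_suggestions rank_suggestions_alt
  simp only []
  set pm : PySem.Dict String Int :=
    PySem.Dict.ofList [("saver", 2), ("spender", 3), ("erratic", 4), ("neutral", 1)] with hpm
  set c : Int :=
    1 + (if (["spender", "erratic"] : List String).contains behavior then (1 : Int) else 0)
      + pm.getD behavior 1 with hc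
  set q : (String × String) → Bool := fun p => PySem.Str.isIn "reducing" p.2 with hq
  -- A's append loop is a map
  have hfun : (fun (acc : List (String × String × Int)) (p : String × String) =>
      let base : Int := 1
      let base : Int := if PySem.Str.isIn "reducing" p.2 then base + 1 else base
      let base : Int := if (["spender", "erratic"] : List String).contains behavior then base + 1 else base
      let priority : Int := base + pm.getD behavior 1
      acc ++ [(p.1, p.2, priority)])
      = (fun (acc : List (String × String × Int)) (p : String × String) =>
          acc ++ [(p.1, p.2, if q p then c + 1 else c)]) := by
    funext acc p
    simp only [hq, hc]
    cases hr : PySem.Str.isIn "reducing" p.2 <;>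
      cases hb : (["spender", "erratic"] : List String).contains behavior <;>
        simp <;> ring_nf
  have hA : suggestions.foldl (fun acc p =>
      let base : Int := 1
      let base : Int := if PySem.Str.isIn "reducing" p.2 then base + 1 else base
      let base : Int := if (["spender", "erratic"] : List String).contains behavior then base + 1 else base
      let priority : Int := base + pm.getD behavior 1
      acc ++ [(p.1, p.2, priority)]) []
      = suggestions.map (fun p => (p.1, p.2, if q p then c + 1 else c)) := by
    rw [hfun, PySem.List.foldl_append_singleton_eq_map]
    simp
  rw [hA, alt_fold_char q c suggestions [] [], partition_sorted q c suggestions]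
  simp

-- ===== VERDICT (by name: the statement is the Claim_ definition above) =====
theorem rank_suggestions_spec : Claim_equal_rank_suggestions := by
  intro suggestions behavior _
  unfold Spec_rank_suggestions
  exact (rank_suggestions_eq suggestions behavior).symm
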